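-- pv_equiv track=rewrite | github.com/rbrn1999/leetcode-sol | problems/2568. Minimum Impossible OR.py | minImpossibleOR
-- ===== SOURCE A (Python) =====
-- from typing import List
--
-- def minImpossibleOR(nums: List[int]) -> int:
--     nums = set(nums)
--     if 1 not in nums:
--         return 1
--
--     num = 2
--
--     while num in nums:
--         num *= 2
--
--     return num
-- ===== SOURCE B (Python) =====
-- from typing import List
--
-- def minImpossibleOR(nums: List[int]) -> int:
--     mask = 0
--     for x in nums:
--         if x > 0 and x & (x - 1) == 0:
--             mask |= x
--     return (mask + 1) & ~mask
-- ===== Notes on version B (the rewrite author's own statement) =====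
-- stated objective: simpler
-- what changed: Replaced A's set construction plus multiply-and-probe while loop by a single pass that ORs every positive power-of-two element into a bitmask and returns the lowest unset bit of the mask via the closed-form bit expression (mask + 1) & ~mask.
import Mathlib
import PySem

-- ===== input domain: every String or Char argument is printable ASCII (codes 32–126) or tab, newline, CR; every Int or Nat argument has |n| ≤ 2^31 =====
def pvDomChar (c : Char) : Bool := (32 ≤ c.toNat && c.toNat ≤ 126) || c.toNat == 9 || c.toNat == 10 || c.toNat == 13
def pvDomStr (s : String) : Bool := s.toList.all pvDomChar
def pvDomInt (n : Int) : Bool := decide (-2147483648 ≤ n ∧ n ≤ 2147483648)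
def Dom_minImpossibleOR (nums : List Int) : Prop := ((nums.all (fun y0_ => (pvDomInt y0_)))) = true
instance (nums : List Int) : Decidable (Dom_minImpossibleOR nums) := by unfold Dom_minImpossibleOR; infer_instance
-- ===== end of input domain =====

-- B replaces A's set + multiply-and-probe loop by one bitmask pass and a closed-form lowest-unset-bit expression (objective: simpler).

-- ===== PORT A =====
-- termination helpers for A's while loop (the loop variable doubles, so the set of
-- list elements ≥ it strictly shrinks whenever the loop continues)
theorem pvFilterMono (p q : Int → Bool) (s : List Int) (hpq : ∀ x, q x = true → p x = true) :
    (s.filter q).length ≤ (s.filter p).length := by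
  induction s with
  | nil => simp
  | cons a t ih =>
    simp only [List.filter_cons]
    by_cases hq : q a = true
    · rw [hq, hpq a hq]; simpa using ih
    · simp only [Bool.not_eq_true] at hq
      rw [hq]
      by_cases hp : p a = true
      · rw [hp]; simp; omega
      · simp only [Bool.not_eq_true] at hp; rw [hp]; simpa using ih

theorem pvFilterLt (p q : Int → Bool) (s : List Int) (y : Int) (hy : y ∈ s)
    (hpq : ∀ x, q x = true → p x = true) (hp : p y = true) (hq : q y = false) :
    (s.filter q).length < (s.filter p).length := by
  induction s with
  | nil => cases hy
  | cons a t ih =>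
    simp only [List.filter_cons]
    rcases List.mem_cons.mp hy with rfl | hyt
    · have := pvFilterMono p q t hpq
      simp [hp, hq]
      omega
    · have h1 := ih hyt
      by_cases hqa : q a = true
      · rw [hqa, hpq a hqa]; simpa using h1
      · simp only [Bool.not_eq_true] at hqa; rw [hqa]
        by_cases hpa : p a = true
        · rw [hpa]; simp; omega
        · simp only [Bool.not_eq_true] at hpa; rw [hpa]; simpa using h1

-- A's while loop: 'while num in nums: num *= 2' (num stays positive, used for termination)
def pvLoopA (s : List Int) (num : Int) (h : 0 < num) : Int :=
  if num ∈ s then pvLoopA s (2 * num) (by omega) else num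
termination_by (s.filter (fun x => decide (num ≤ x))).length
decreasing_by
  exact pvFilterLt (fun x => decide (num ≤ x)) (fun x => decide (2 * num ≤ x)) s num
    (by assumption) (fun x hx => by simp at hx ⊢; omega) (by simp) (by simp; omega)

def minImpossibleOR (nums : List Int) : Int :=
  let s := PySem.Set.ofList nums
  if ¬ ((1 : Int) ∈ s) then 1
  else pvLoopA s 2 (by norm_num)

-- ===== PORT B =====
-- body of B's for loop: OR x into mask when x > 0 and x & (x-1) == 0
def pvMaskStep (mask x : Int) : Int :=
  if 0 < x ∧ Int.land x (x - 1) = 0 then Int.lor mask x else mask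

def minImpossibleOR_alt (nums : List Int) : Int :=
  let mask := nums.foldl pvMaskStep 0
  Int.land (mask + 1) (Int.not mask)

-- ===== PRECONDITION & SPEC =====
def Spec_minImpossibleOR (nums : List Int) (out : Int) : Prop := out = minImpossibleOR_alt nums
instance (nums : List Int) (out : Int) : Decidable (Spec_minImpossibleOR nums out) := by unfold Spec_minImpossibleOR; infer_instance

-- ===== CLAIM (what is proved, stated in full; the proofs are below) =====
def Claim_equal_minImpossibleOR : Prop := ∀ (nums : List Int), Dom_minImpossibleOR nums → Spec_minImpossibleOR nums (minImpossibleOR nums)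

-- ===== LEMMAS AND PROOFS =====

theorem pvTbTwoMulZero (b : ℕ) : (2 * b).testBit 0 = false := by
  rw [Nat.testBit_zero, decide_eq_false_iff_not]; omega

theorem pvTbTwoMulSucc (b j : ℕ) : (2 * b).testBit (j + 1) = b.testBit j := by
  rw [Nat.testBit_succ]; congr 1; omega

theorem pvTbOddZero (b : ℕ) : (2 * b + 1).testBit 0 = true := by
  rw [Nat.testBit_zero, decide_eq_true_eq]; omega

theorem pvTbOddSucc (b j : ℕ) : (2 * b + 1).testBit (j + 1) = b.testBit j := by
  rw [Nat.testBit_succ]; congr 1; omega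

-- lowest unset bit: if bits 0..n-1 of a are set and bit n is not, (a+1) &~ a = 2^n
theorem pvLdiffLow : ∀ (n a : ℕ), (∀ j < n, a.testBit j = true) → a.testBit n = false →
    Nat.ldiff (a + 1) a = 2 ^ n := by
  intro n
  induction n with
  | zero =>
    intro a _ h0
    have hmod : a % 2 = 0 := by
      have h := h0; rw [Nat.testBit_zero, decide_eq_false_iff_not] at h; omega
    have ha : a = 2 * (a / 2) := by omega
    apply Nat.eq_of_testBit_eq
    intro j
    rw [Nat.testBit_ldiff]
    cases j with
    | zero =>
      have h1 : (a + 1).testBit 0 = true := by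
        have : a + 1 = 2 * (a / 2) + 1 := by omega
        rw [this]; exact pvTbOddZero _
      simp [h1, h0]
    | succ j =>
      have h1 : (a + 1).testBit (j + 1) = (a / 2).testBit j := by
        have : a + 1 = 2 * (a / 2) + 1 := by omega
        rw [this]; exact pvTbOddSucc _ _
      have h2 : a.testBit (j + 1) = (a / 2).testBit j := by
        conv_lhs => rw [ha]
        exact pvTbTwoMulSucc _ _
      have h3 : (2 ^ 0 : ℕ).testBit (j + 1) = false := by
        rw [pow_zero, Nat.testBit_succ]; simp
      rw [h1, h2, h3]
      cases (a / 2).testBit j <;> simp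
  | succ n ih =>
    intro a hlow hn
    have h0 : a.testBit 0 = true := hlow 0 (by omega)
    have hmod : a % 2 = 1 := by
      have h := h0; rw [Nat.testBit_zero, decide_eq_true_eq] at h; omega
    set b := a / 2 with hb
    have ha : a = 2 * b + 1 := by omega
    have hblow : ∀ j < n, b.testBit j = true := by
      intro j hj
      have := hlow (j + 1) (by omega)
      rw [ha, pvTbOddSucc] at this; exact this
    have hbn : b.testBit n = false := by
      have := hn; rw [ha, pvTbOddSucc] at this; exact this
    have hih := ih b hblow hbn
    apply Nat.eq_of_testBit_eq
    intro j
    rw [Nat.testBit_ldiff]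
    cases j with
    | zero =>
      have h1 : (a + 1).testBit 0 = false := by
        have : a + 1 = 2 * (b + 1) := by omega
        rw [this]; exact pvTbTwoMulZero _
      simp [h1]
    | succ j =>
      have h1 : (a + 1).testBit (j + 1) = (b + 1).testBit j := by
        have : a + 1 = 2 * (b + 1) := by omega
        rw [this]; exact pvTbTwoMulSucc _ _
      have h2 : a.testBit (j + 1) = b.testBit j := by rw [ha]; exact pvTbOddSucc _ _
      rw [h1, h2, ← Nat.testBit_ldiff, hih]
      simp [Nat.testBit_two_pow]

-- x & (x-1) == 0 characterises powers of two among positive naturals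
theorem pvPow2Nat : ∀ m : ℕ, 0 < m → ((m &&& (m - 1)) = 0 ↔ ∃ j, m = 2 ^ j) := by
  intro m
  induction m using Nat.strong_induction_on with
  | _ m ih =>
    intro hm
    rcases Nat.even_or_odd m with ⟨b, hb⟩ | ⟨b, hb⟩
    · -- m = 2*b even, b > 0
      have hb' : m = 2 * b := by omega
      have hbpos : 0 < b := by omega
      have key : m &&& (m - 1) = 2 * (b &&& (b - 1)) := by
        apply Nat.eq_of_testBit_eq
        intro j
        rw [Nat.testBit_land]
        cases j with
        | zero =>
          rw [hb', pvTbTwoMulZero, pvTbTwoMulZero]; simp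
        | succ j =>
          have e1 : m.testBit (j + 1) = b.testBit j := by rw [hb']; exact pvTbTwoMulSucc _ _
          have e2 : (m - 1).testBit (j + 1) = (b - 1).testBit j := by
            have : m - 1 = 2 * (b - 1) + 1 := by omega
            rw [this]; exact pvTbOddSucc _ _
          rw [e1, e2, pvTbTwoMulSucc, Nat.testBit_land]
      rw [key]
      constructor
      · intro h
        have hz : b &&& (b - 1) = 0 := by omega
        obtain ⟨j, hj⟩ := (ih b (by omega) hbpos).mp hz
        exact ⟨j + 1, by rw [hb', hj]; ring⟩
      · rintro ⟨j, hj⟩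
        cases j with
        | zero => omega
        | succ j =>
          have : b = 2 ^ j := by rw [hb'] at hj; rw [pow_succ] at hj; omega
          have hz := (ih b (by omega) hbpos).mpr ⟨j, this⟩
          omega
    · -- m = 2*b + 1 odd
      have hb' : m = 2 * b + 1 := by omega
      rcases Nat.eq_zero_or_pos b with hbz | hbpos
      · constructor
        · intro _; exact ⟨0, by omega⟩
        · intro _
          apply Nat.eq_of_testBit_eq
          intro j
          rw [Nat.testBit_land]
          have : m - 1 = 0 := by omega
          rw [this, Nat.zero_testBit]; simp
      · have key : m &&& (m - 1) = 2 * b := by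
          apply Nat.eq_of_testBit_eq
          intro j
          rw [Nat.testBit_land]
          cases j with
          | zero =>
            have : (m - 1).testBit 0 = false := by
              have : m - 1 = 2 * b := by omega
              rw [this]; exact pvTbTwoMulZero _
            rw [this, pvTbTwoMulZero]; simp
          | succ j =>
            have e1 : m.testBit (j + 1) = b.testBit j := by rw [hb']; exact pvTbOddSucc _ _
            have e2 : (m - 1).testBit (j + 1) = b.testBit j := by
              have : m - 1 = 2 * b := by omega
              rw [this]; exact pvTbTwoMulSucc _ _
            rw [e1, e2, pvTbTwoMulSucc]
            cases b.testBit j <;> simp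
        rw [key]
        constructor
        · intro h; omega
        · rintro ⟨j, hj⟩
          cases j with
          | zero => omega
          | succ j => rw [pow_succ] at hj; omega

-- the Int-level power-of-two test used by B's filter
theorem pvPow2Int (x : Int) : (0 < x ∧ Int.land x (x - 1) = 0) ↔ ∃ j : ℕ, x = 2 ^ j := by
  constructor
  · rintro ⟨hpos, hland⟩
    obtain ⟨n, rfl⟩ := Int.eq_ofNat_of_zero_le (le_of_lt hpos)
    have hn : 0 < n := by exact_mod_cast hpos
    obtain ⟨m, rfl⟩ : ∃ m, n = m + 1 := ⟨n - 1, by omega⟩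
    have hsub : ((m + 1 : ℕ) : Int) - 1 = (m : Int) := by push_cast; ring
    rw [hsub] at hland
    have hz' : (((m + 1) &&& m : ℕ) : Int) = 0 := hland
    have hz : (m + 1) &&& m = 0 := by exact_mod_cast hz'
    have hz2 : (m + 1) &&& ((m + 1) - 1) = 0 := by simpa using hz
    obtain ⟨j, hj⟩ := (pvPow2Nat (m + 1) (by omega)).mp hz2
    exact ⟨j, by rw [hj]; push_cast; ring⟩
  · rintro ⟨j, rfl⟩
    refine ⟨by positivity, ?_⟩
    have hcast : (2 : Int) ^ j = ((2 ^ j : ℕ) : Int) := by push_cast; ring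
    have hsub : (2 : Int) ^ j - 1 = ((2 ^ j - 1 : ℕ) : Int) := by
      have h1 : 1 ≤ 2 ^ j := Nat.one_le_two_pow
      push_cast [h1]; ring
    rw [hsub, hcast]
    have hz : 2 ^ j &&& (2 ^ j - 1) = 0 :=
      (pvPow2Nat (2 ^ j) (by positivity)).mpr ⟨j, rfl⟩
    show (((2 ^ j) &&& (2 ^ j - 1) : ℕ) : Int) = 0
    rw [hz]; rfl

theorem pvPowInjInt {j m : ℕ} (h : (2 : Int) ^ j = 2 ^ m) : j = m := by
  have : (2 : ℕ) ^ j = 2 ^ m := by exact_mod_cast h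
  exact Nat.pow_right_injective (by omega) this

-- mask invariant for B's fold
theorem pvFoldMask : ∀ (l : List Int) (a : ℕ),
    ∃ b : ℕ, List.foldl pvMaskStep ((a : ℕ) : Int) l = ((b : ℕ) : Int) ∧
      ∀ j, b.testBit j = (a.testBit j || decide ((2 ^ j : Int) ∈ l)) := by
  intro l
  induction l with
  | nil => intro a; exact ⟨a, rfl, by simp⟩
  | cons x t ih =>
    intro a
    by_cases hx : 0 < x ∧ Int.land x (x - 1) = 0
    · obtain ⟨m, rfl⟩ := (pvPow2Int x).mp hx
      have hstep : pvMaskStep ((a : ℕ) : Int) (2 ^ m) = (((a ||| 2 ^ m : ℕ)) : Int) := by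
        rw [pvMaskStep, if_pos hx]
        have : (2 : Int) ^ m = ((2 ^ m : ℕ) : Int) := by push_cast; ring
        rw [this]
        rfl
      obtain ⟨b, hfold, hbits⟩ := ih (a ||| 2 ^ m)
      refine ⟨b, by rw [List.foldl_cons, hstep]; exact hfold, ?_⟩
      intro j
      rw [hbits j, Nat.testBit_lor, Nat.testBit_two_pow]
      have hiff : ((2 ^ j : Int) ∈ (2 : Int) ^ m :: t) ↔ (m = j ∨ (2 ^ j : Int) ∈ t) := by
        rw [List.mem_cons]
        constructor
        · rintro (h | h)
          · exact Or.inl (pvPowInjInt h.symm)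
          · exact Or.inr h
        · rintro (rfl | h)
          · exact Or.inl rfl
          · exact Or.inr h
      have hmem : decide ((2 ^ j : Int) ∈ 2 ^ m :: t)
          = (decide (m = j) || decide ((2 ^ j : Int) ∈ t)) := by
        rw [show (decide (m = j) || decide ((2 ^ j : Int) ∈ t)) = decide (m = j ∨ (2 ^ j : Int) ∈ t) from (Bool.decide_or _ _).symm]
        exact decide_eq_decide.mpr hiff
      rw [hmem]
      cases a.testBit j <;> cases decide (m = j) <;> cases decide ((2 ^ j : Int) ∈ t) <;> rfl
    · have hstep : pvMaskStep ((a : ℕ) : Int) x = ((a : ℕ) : Int) := by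
        rw [pvMaskStep, if_neg hx]
      obtain ⟨b, hfold, hbits⟩ := ih a
      refine ⟨b, by rw [List.foldl_cons, hstep]; exact hfold, ?_⟩
      intro j
      rw [hbits j]
      have hne : ((2 ^ j : Int) ∈ x :: t) ↔ ((2 ^ j : Int) ∈ t) := by
        simp only [List.mem_cons]
        constructor
        · rintro (h | h)
          · exact absurd ((pvPow2Int x).mpr ⟨j, h.symm⟩) hx
          · exact h
        · intro h; right; exact h
      simp only [hne]

-- A's loop returns 2^(least k with 2^k missing)
theorem pvLoopEq (s : List Int) (hex : ∃ k : ℕ, ((2 : Int) ^ k) ∉ s) :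
    ∀ fuel k (_ : Nat.find hex < k + fuel) (_ : ∀ j < k, ((2 : Int) ^ j) ∈ s)
      (h2 : (0 : Int) < 2 ^ k),
      pvLoopA s ((2 : Int) ^ k) h2 = 2 ^ (Nat.find hex) := by
  intro fuel
  induction fuel with
  | zero =>
    intro k hfuel hk _
    exfalso
    exact Nat.find_spec hex (hk (Nat.find hex) (by omega))
  | succ fuel ih =>
    intro k hfuel hk h2
    rw [pvLoopA]
    by_cases hmem : ((2 : Int) ^ k) ∈ s
    · rw [if_pos hmem]
      have hkne : Nat.find hex ≠ k := by
        intro h; exact Nat.find_spec hex (h ▸ hmem)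
      have hfind : Nat.find hex < (k + 1) + fuel := by omega
      have hk' : ∀ j < k + 1, ((2 : Int) ^ j) ∈ s := by
        intro j hj
        rcases Nat.lt_succ_iff_lt_or_eq.mp hj with h | rfl
        · exact hk j h
        · exact hmem
      have heq : (2 : Int) * 2 ^ k = 2 ^ (k + 1) := by ring
      calc pvLoopA s (2 * 2 ^ k) _ = pvLoopA s (2 ^ (k + 1)) (by positivity) := by
              congr 1
           _ = 2 ^ (Nat.find hex) := ih (k + 1) hfind hk' _
    · rw [if_neg hmem]
      have h1 : Nat.find hex ≤ k := Nat.find_le hmem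
      have h2' : ¬ (Nat.find hex < k) := by
        intro h
        exact Nat.find_spec hex (hk _ h)
      have : Nat.find hex = k := by omega
      rw [this]

theorem pvLoopA_congr (s : List Int) (a b : Int) (ha : 0 < a) (hb : 0 < b) (e : a = b) :
    pvLoopA s a ha = pvLoopA s b hb := by subst e; rfl

theorem pvMaskPlusOne (b : ℕ) :
    Int.land (((b : ℕ) : Int) + 1) (Int.not ((b : ℕ) : Int)) = ((Nat.ldiff (b + 1) b : ℕ) : Int) := rfl

-- ===== VERDICT (by name: the statement is the Claim_ definition above) =====
theorem minImpossibleOR_spec : Claim_equal_minImpossibleOR := by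
  intro nums hdom
  unfold Spec_minImpossibleOR
  set s : List Int := PySem.Set.ofList nums with hs
  have hmemiff : ∀ x : Int, x ∈ s ↔ x ∈ nums := fun x => PySem.Set.mem_ofList nums x
  have hex : ∃ k : ℕ, ((2 : Int) ^ k) ∉ s := by
    refine ⟨32, fun hmem => ?_⟩
    have hmem' : ((2 : Int) ^ 32) ∈ nums := (hmemiff _).mp hmem
    have := List.all_eq_true.mp hdom _ hmem'
    simp only [pvDomInt, decide_eq_true_eq] at this
    norm_num at this
  set n := Nat.find hex with hn
  -- B's value
  obtain ⟨b, hfold, hbits⟩ := pvFoldMask nums 0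
  have hbits' : ∀ j, b.testBit j = decide ((2 ^ j : Int) ∈ nums) := by
    intro j; rw [hbits j, Nat.zero_testBit, Bool.false_or]
  have hblow : ∀ j < n, b.testBit j = true := by
    intro j hj
    rw [hbits' j, decide_eq_true_eq]
    exact (hmemiff _).mp (not_not.mp (Nat.find_min hex hj))
  have hbn : b.testBit n = false := by
    rw [hbits' n, decide_eq_false_iff_not]
    intro h
    exact Nat.find_spec hex ((hmemiff _).mpr h)
  have hldiff : Nat.ldiff (b + 1) b = 2 ^ n := pvLdiffLow n b hblow hbn
  have hB : minImpossibleOR_alt nums = (2 : Int) ^ n := by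
    unfold minImpossibleOR_alt
    show Int.land ((List.foldl pvMaskStep 0 nums) + 1) (Int.not (List.foldl pvMaskStep 0 nums)) = _
    have h0 : (0 : Int) = ((0 : ℕ) : Int) := rfl
    rw [h0, hfold, pvMaskPlusOne, hldiff]
    push_cast; ring
  rw [hB]
  -- A's value
  unfold minImpossibleOR
  rw [← hs]
  by_cases h1 : (1 : Int) ∈ s
  · rw [if_neg (not_not.mpr h1)]
    have hk1 : ∀ j < 1, ((2 : Int) ^ j) ∈ s := by
      intro j hj
      have : j = 0 := by omega
      subst this; simpa using h1
    have hloop := pvLoopEq s hex (n + 1) 1 (by omega) hk1 (by norm_num)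
    exact (pvLoopA_congr s 2 ((2 : Int) ^ 1) (by norm_num) (by norm_num) (by norm_num)).trans hloop
  · rw [if_pos h1]
    have hn0 : n = 0 := by
      rw [hn, Nat.find_eq_zero]
      simpa using h1
    rw [hn0]; norm_num
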